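-- pv_equiv track=rewrite | github.com/BuzzDyne/wms-pickiist-engine | main.py | find_items_by_product_types
-- ===== SOURCE A (Python) =====
-- def find_items_by_product_types(product_names, type_aliases):
--     results = {main_type: [] for main_type in type_aliases}
--     remaining_items = []
--
--     for product_name in product_names:
--         found = False
--
--         for main_type, aliases in type_aliases.items():
--             # Check if any alias is found in the product name
--             for alias in aliases:
--                 if alias in product_name.lower():
--                     results[main_type].append(product_name)
--                     found = True
--                     break  # Exit if a match is found for this alias
--             if found:
--                 break  # Exit if a match is found for this main type
--
--         if not found:
--             remaining_items.append(product_name)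
--
--     # Sort results
--     for main_type in results:
--         results[main_type] = sorted(results[main_type])
--
--     return results, sorted(remaining_items)
-- ===== SOURCE B (Python) =====
-- def find_items_by_product_types(product_names, type_aliases):
--     # Type-major staged passes: one partition of the still-unclassified products per type.
--     pending = [(name, name.lower()) for name in product_names]
--     results = {}
--     for main_type, aliases in type_aliases.items():
--         hits = [p for p in pending if any(a in p[1] for a in aliases)]
--         pending = [p for p in pending if not any(a in p[1] for a in aliases)]
--         results[main_type] = sorted(name for name, _ in hits)
--     return results, sorted(name for name, _ in pending)
-- ===== Notes on version B (the rewrite author's own statement) =====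
-- stated objective: alternative
-- what changed: B inverts the loop nesting: instead of A's per-product scan over all types and aliases with flag-and-break plus a final sort of every bucket, B lowercases every name once and makes one staged pass per TYPE, partitioning the still-unclassified products into that type's bucket and carrying the shrinking pending list forward.
import Mathlib
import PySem

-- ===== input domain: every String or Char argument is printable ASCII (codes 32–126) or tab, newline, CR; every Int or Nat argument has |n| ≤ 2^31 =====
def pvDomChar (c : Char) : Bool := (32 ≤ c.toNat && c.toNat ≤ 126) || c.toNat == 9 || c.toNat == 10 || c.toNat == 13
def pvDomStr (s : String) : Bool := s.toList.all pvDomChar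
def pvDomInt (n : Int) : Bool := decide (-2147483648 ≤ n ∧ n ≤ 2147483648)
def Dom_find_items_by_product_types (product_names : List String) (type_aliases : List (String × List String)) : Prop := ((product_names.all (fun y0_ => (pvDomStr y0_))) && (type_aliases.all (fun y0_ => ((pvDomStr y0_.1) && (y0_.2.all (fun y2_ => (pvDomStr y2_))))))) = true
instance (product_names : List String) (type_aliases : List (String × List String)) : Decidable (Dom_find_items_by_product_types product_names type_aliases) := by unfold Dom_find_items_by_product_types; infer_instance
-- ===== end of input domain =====

-- B inverts the loop nesting (type-major staged partition passes instead of A's per-product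
-- scan over all types with flag-and-break); return-value equivalence proved on Pre_ (dict
-- keys pairwise distinct).

-- ===== PORT A =====
-- for alias in aliases: if alias in product_name.lower(): found = True; break
def pvA_aliasLoop (name : String) (aliases : List String) : Bool :=
  match aliases with
  | [] => false
  | a :: rest => if PySem.Str.isIn a (PySem.Str.lower name) then true else pvA_aliasLoop name rest

-- results[t].append(name): a Python dict updates its (unique under Pre_) key in place
def pvA_append (rs : List (String × List String)) (t : String) (name : String) : List (String × List String) :=
  match rs with
  | [] => []
  | (k, l) :: rest => if k = t then (k, l ++ [name]) :: rest else (k, l) :: pvA_append rest t name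

-- for main_type, aliases in type_aliases.items(): … break
def pvA_typeLoop (name : String) (ta : List (String × List String))
    (rs : List (String × List String)) : List (String × List String) × Bool :=
  match ta with
  | [] => (rs, false)
  | (t, als) :: rest =>
      if pvA_aliasLoop name als then (pvA_append rs t name, true)
      else pvA_typeLoop name rest rs

-- for product_name in product_names: …
def pvA_main (ta : List (String × List String)) (ps : List String)
    (rs : List (String × List String)) (rem : List String) :
    List (String × List String) × List String :=
  match ps with
  | [] => (rs, rem)
  | p :: rest =>
      let st := pvA_typeLoop p ta rs
      pvA_main ta rest st.1 (if st.2 then rem else rem ++ [p])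

def find_items_by_product_types (product_names : List String) (type_aliases : List (String × List String)) : (List (String × List String)) × List String :=
  -- results = {main_type: [] for main_type in type_aliases}  (dict keys unique under Pre_)
  let st := pvA_main type_aliases product_names (type_aliases.map (fun q => (q.1, ([] : List String)))) []
  (st.1.map (fun q => (q.1, PySem.List.sorted q.2 (fun x => x) false)),
   PySem.List.sorted st.2 (fun x => x) false)

-- ===== PORT B =====
-- any(a in p[1] for a in aliases)
def pvB_match (als : List String) (low : String) : Bool :=
  als.any (fun a => PySem.Str.isIn a low)

def find_items_by_product_types_alt (product_names : List String) (type_aliases : List (String × List String)) : (List (String × List String)) × List String :=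
  -- pending = [(name, name.lower()) for name in product_names]; results = {}
  -- for main_type, aliases: hits / pending partition; results[main_type] = sorted hit names
  let fin := type_aliases.foldl
    (fun st q =>
      let hits := st.1.filter (fun p => pvB_match q.2 p.2)
      let pending := st.1.filter (fun p => !pvB_match q.2 p.2)
      (pending, st.2 ++ [(q.1, PySem.List.sorted (hits.map Prod.fst) (fun x => x) false)]))
    (product_names.map (fun n => (n, PySem.Str.lower n)), ([] : List (String × List String)))
  (fin.2, PySem.List.sorted (fin.1.map Prod.fst) (fun x => x) false)

-- ===== PRECONDITION & SPEC =====
-- Pre_ excludes type_aliases whose association-list representation has duplicate keys: the Python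
-- function receives a dict, which cannot hold duplicates (a duplicate-key literal collapses before
-- the call), so behaviour there is representation-dependent.
def Pre_find_items_by_product_types (product_names : List String) (type_aliases : List (String × List String)) : Prop :=
  (type_aliases.map (fun q => q.1)).Nodup

instance (product_names : List String) (type_aliases : List (String × List String)) : Decidable (Pre_find_items_by_product_types product_names type_aliases) := by unfold Pre_find_items_by_product_types; infer_instance

def pvWitness_find_items_by_product_types : List String × (List (String × List String)) :=
  (["Apple Juice", "soap bar"], [("fruit", ["apple", "pear"]), ("soap", ["soap"])])

def Spec_find_items_by_product_types (product_names : List String) (type_aliases : List (String × List String)) (out : (List (String × List String)) × List String) : Prop := out = find_items_by_product_types_alt product_names type_aliases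
instance (product_names : List String) (type_aliases : List (String × List String)) (out : (List (String × List String)) × List String) : Decidable (Spec_find_items_by_product_types product_names type_aliases out) := by unfold Spec_find_items_by_product_types; infer_instance

-- ===== CLAIM (what is proved, stated in full; the proofs are below) =====
def Claim_equal_find_items_by_product_types : Prop := ∀ (product_names : List String) (type_aliases : List (String × List String)), Dom_find_items_by_product_types product_names type_aliases → Pre_find_items_by_product_types product_names type_aliases → Spec_find_items_by_product_types product_names type_aliases (find_items_by_product_types product_names type_aliases)

-- ===== LEMMAS AND PROOFS =====

-- first main_type one of whose aliases occurs in low, else none (proof-only helper)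
def pvCls (ta : List (String × List String)) (low : String) : Option String :=
  (ta.find? (fun q => pvB_match q.2 low)).map (fun q => q.1)

def pvFilt (ta : List (String × List String)) (k : String) (ps : List String) : List String :=
  ps.filter (fun p => pvCls ta (PySem.Str.lower p) == some k)

def pvRem (ta : List (String × List String)) (ps : List String) : List String :=
  ps.filter (fun p => (pvCls ta (PySem.Str.lower p)).isNone)

theorem pvCls_cons (t : String) (als : List String)
    (rest : List (String × List String)) (low : String) :
    pvCls ((t, als) :: rest) low =
      if pvB_match als low then some t else pvCls rest low := by
  simp only [pvCls, List.find?_cons]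
  cases h : pvB_match als low <;>
    · split <;> simp_all

theorem pvCls_mem (ta : List (String × List String)) (low : String) (k : String)
    (h : pvCls ta low = some k) : k ∈ ta.map (fun q => q.1) := by
  induction ta with
  | nil => simp [pvCls] at h
  | cons q rest ih =>
      obtain ⟨t, als⟩ := q
      rw [pvCls_cons] at h
      by_cases hm : pvB_match als low = true
      · rw [if_pos hm] at h; simp at h; simp [h]
      · rw [if_neg hm] at h; simpa using Or.inr (ih h)

theorem pvA_aliasLoop_eq (name : String) (als : List String) :
    pvA_aliasLoop name als = pvB_match als (PySem.Str.lower name) := by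
  induction als with
  | nil => rfl
  | cons a rest ih =>
      by_cases h : PySem.Chars.isIn a.toList (PySem.Chars.lower name.toList)
      · simp [pvA_aliasLoop, pvB_match, PySem.Str.isIn, h]
      · simp [pvA_aliasLoop, pvB_match, PySem.Str.isIn, h] at ih ⊢; exact ih

theorem pvA_typeLoop_eq (name : String) (ta : List (String × List String))
    (rs : List (String × List String)) :
    pvA_typeLoop name ta rs =
      match pvCls ta (PySem.Str.lower name) with
      | some t => (pvA_append rs t name, true)
      | none => (rs, false) := by
  induction ta with
  | nil => rfl
  | cons q rest ih =>
      obtain ⟨t, als⟩ := q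
      rw [show pvA_typeLoop name ((t, als) :: rest) rs =
            (if pvA_aliasLoop name als then (pvA_append rs t name, true)
             else pvA_typeLoop name rest rs) from rfl,
        pvA_aliasLoop_eq, pvCls_cons]
      by_cases h : pvB_match als (PySem.Str.lower name) = true
      · rw [if_pos h, if_pos h]
      · rw [if_neg h, if_neg h, ih]

theorem pvA_append_keys (rs : List (String × List String)) (t name : String) :
    (pvA_append rs t name).map (fun q => q.1) = rs.map (fun q => q.1) := by
  induction rs with
  | nil => rfl
  | cons q rest ih =>
      obtain ⟨k, l⟩ := q
      by_cases h : k = t <;> simp [pvA_append, h, ih]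

theorem pvFilt_cons_none (ta : List (String × List String)) (k : String) (p : String)
    (rest : List String) (h : pvCls ta (PySem.Str.lower p) = none) :
    pvFilt ta k (p :: rest) = pvFilt ta k rest := by
  simp [pvFilt, h]

theorem pvFilt_cons_some_ne (ta : List (String × List String)) (k t : String) (p : String)
    (rest : List String) (h : pvCls ta (PySem.Str.lower p) = some t) (hne : k ≠ t) :
    pvFilt ta k (p :: rest) = pvFilt ta k rest := by
  simp [pvFilt, h, Ne.symm hne]

theorem pvFilt_cons_some_eq (ta : List (String × List String)) (t : String) (p : String)
    (rest : List String) (h : pvCls ta (PySem.Str.lower p) = some t) :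
    pvFilt ta t (p :: rest) = p :: pvFilt ta t rest := by
  simp [pvFilt, h]

theorem pvRem_cons_none (ta : List (String × List String)) (p : String)
    (rest : List String) (h : pvCls ta (PySem.Str.lower p) = none) :
    pvRem ta (p :: rest) = p :: pvRem ta rest := by
  simp [pvRem, h]

theorem pvRem_cons_some (ta : List (String × List String)) (t : String) (p : String)
    (rest : List String) (h : pvCls ta (PySem.Str.lower p) = some t) :
    pvRem ta (p :: rest) = pvRem ta rest := by
  simp [pvRem, h]

-- absorbing one appended name into the per-key filters (keys unique)
theorem pvA_append_absorb (ta : List (String × List String)) (t p : String)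
    (rest : List String) (rs : List (String × List String))
    (hnd : (rs.map (fun q => q.1)).Nodup)
    (h : pvCls ta (PySem.Str.lower p) = some t) :
    (pvA_append rs t p).map (fun q => (q.1, q.2 ++ pvFilt ta q.1 rest)) =
      rs.map (fun q => (q.1, q.2 ++ pvFilt ta q.1 (p :: rest))) := by
  induction rs with
  | nil => rfl
  | cons q tail ih =>
      obtain ⟨k, l⟩ := q
      simp only [List.map_cons, List.nodup_cons] at hnd
      by_cases hk : k = t
      · subst hk
        rw [show pvA_append ((k, l) :: tail) k p = (k, l ++ [p]) :: tail by
              simp [pvA_append]]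
        simp only [List.map_cons, pvFilt_cons_some_eq ta k p rest h,
          List.cons.injEq, Prod.mk.injEq]
        refine ⟨by simp, ?_⟩
        apply List.map_congr_left
        intro q hq
        have hne : q.1 ≠ k := by
          intro he; exact hnd.1 (he ▸ List.mem_map_of_mem hq)
        rw [pvFilt_cons_some_ne ta q.1 k p rest h hne]
      · rw [show pvA_append ((k, l) :: tail) t p = (k, l) :: pvA_append tail t p by
              simp [pvA_append, hk]]
        simp only [List.map_cons, pvFilt_cons_some_ne ta k t p rest h hk,
          List.cons.injEq]
        refine ⟨by simp, ih hnd.2⟩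

theorem pvA_main_eq (ta : List (String × List String)) (ps : List String)
    (rs : List (String × List String)) (rem : List String)
    (hnd : (rs.map (fun q => q.1)).Nodup) :
    pvA_main ta ps rs rem =
      (rs.map (fun q => (q.1, q.2 ++ pvFilt ta q.1 ps)), rem ++ pvRem ta ps) := by
  induction ps generalizing rs rem with
  | nil => simp [pvA_main, pvFilt, pvRem]
  | cons p rest ih =>
      simp only [pvA_main, pvA_typeLoop_eq]
      cases h : pvCls ta (PySem.Str.lower p) with
      | none =>
          simp only [Bool.false_eq_true, if_false]
          rw [ih rs (rem ++ [p]) hnd, pvRem_cons_none ta p rest h, Prod.mk.injEq]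
          refine ⟨?_, by simp⟩
          apply List.map_congr_left
          intro q hq
          rw [pvFilt_cons_none ta q.1 p rest h]
      | some t =>
          simp only [if_true]
          rw [ih (pvA_append rs t p) rem (by rw [pvA_append_keys]; exact hnd),
            pvA_append_absorb ta t p rest rs hnd h, pvRem_cons_some ta t p rest h]

-- B's type-major fold computes, per key, the sorted names whose first matching type is that key
theorem pvB_fold_eq (ta : List (String × List String)) (P : List (String × String))
    (acc : List (String × List String)) (hnd : (ta.map (fun q => q.1)).Nodup) :
    ta.foldl
      (fun st q =>
        let hits := st.1.filter (fun p => pvB_match q.2 p.2)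
        let pending := st.1.filter (fun p => !pvB_match q.2 p.2)
        (pending, st.2 ++ [(q.1, PySem.List.sorted (hits.map Prod.fst) (fun x => x) false)]))
      (P, acc) =
      (P.filter (fun p => (pvCls ta p.2).isNone),
       acc ++ ta.map (fun q => (q.1,
         PySem.List.sorted ((P.filter (fun p => pvCls ta p.2 == some q.1)).map Prod.fst)
           (fun x => x) false))) := by
  induction ta generalizing P acc with
  | nil => simp [pvCls]
  | cons q rest ih =>
      obtain ⟨t, als⟩ := q
      simp only [List.map_cons, List.nodup_cons] at hnd
      simp only [List.foldl_cons]
      rw [ih _ _ hnd.2]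
      refine Prod.ext ?_ ?_
      · show _ = P.filter (fun p => (pvCls ((t, als) :: rest) p.2).isNone)
        rw [List.filter_filter]
        apply List.filter_congr
        intro p _
        rw [pvCls_cons]
        by_cases h : pvB_match als p.2 = true <;> simp [h]
      · show acc ++ [(t, _)] ++ _ = acc ++ _
        rw [List.append_assoc]
        congr 1
        simp only [List.map_cons, List.singleton_append, List.cons.injEq]
        constructor
        · -- head bucket: matched-now = classified-as-t (t not a key of rest)
          refine Prod.ext rfl ?_
          show PySem.List.sorted _ _ _ = PySem.List.sorted _ _ _
          congr 1
          congr 1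
          apply List.filter_congr
          intro p _
          rw [pvCls_cons]
          by_cases h : pvB_match als p.2 = true
          · simp [h]
          · simp only [h, Bool.false_eq_true, if_false]
            cases hc : pvCls rest p.2 with
            | none => simp
            | some k =>
                have : k ≠ t := by
                  intro he; exact hnd.1 (he ▸ pvCls_mem rest p.2 k hc)
                simp [this]
        · -- tail buckets: filter twice = filter by the cons classifier
          apply List.map_congr_left
          intro q hq
          refine Prod.ext rfl ?_
          show PySem.List.sorted _ _ _ = PySem.List.sorted _ _ _
          congr 1
          congr 1
          rw [List.filter_filter]
          apply List.filter_congr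
          intro p _
          rw [pvCls_cons]
          have hqt : q.1 ≠ t := by
            intro he; exact hnd.1 (he ▸ List.mem_map_of_mem hq)
          by_cases h : pvB_match als p.2 = true
          · simp [h, Ne.symm hqt]
          · simp [h]

-- filtering the (name, lower name) pairs then projecting = filtering the names
theorem pv_pair_filter (ps : List String) (g : String → Bool) :
    ((ps.map (fun n => (n, PySem.Str.lower n))).filter (fun p => g p.2)).map Prod.fst
      = ps.filter (fun n => g (PySem.Str.lower n)) := by
  induction ps with
  | nil => rfl
  | cons a rest ih =>
      by_cases h : g (PySem.Str.lower a) = true <;> simp [h, ih]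

-- ===== VERDICT (by name: the statement is the Claim_ definition above) =====
theorem find_items_by_product_types_spec : Claim_equal_find_items_by_product_types := by
  intro ps ta _hdom hpre
  unfold Spec_find_items_by_product_types
  unfold find_items_by_product_types find_items_by_product_types_alt
  have hnd : ((ta.map (fun q => (q.1, ([] : List String)))).map (fun q => q.1)).Nodup := by
    rw [List.map_map]; exact hpre
  rw [pvA_main_eq ta ps _ [] hnd, pvB_fold_eq ta _ [] hpre]
  simp only [List.map_map, List.nil_append]
  refine Prod.ext ?_ ?_
  · apply List.map_congr_left
    intro q _hq
    simp only [Function.comp, List.nil_append, Prod.mk.injEq]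
    refine ⟨trivial, ?_⟩
    congr 1
    rw [pv_pair_filter ps (fun low => pvCls ta low == some q.1)]
    rfl
  · show PySem.List.sorted (pvRem ta ps) _ _ = PySem.List.sorted _ _ _
    congr 1
    rw [pv_pair_filter ps (fun low => (pvCls ta low).isNone)]
    rfl
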